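-- pv_equiv track=rewrite | github.com/hsh519/TIL | 프로그래머스/PCCP모의고사1회/외톨이 알파벳.py | solution
-- ===== SOURCE A (Python) =====
-- def solution(input_string):
--     answer = ''
--     s = ''
--     ls = []
--     for e in input_string:
--         ls.append(e)
--     ls.sort()
--     while (ls):
--         cnt = ls.count(ls[0])
--         s = cnt * ls[0]
--         if s not in input_string:
--             answer += ls[0]
--         del ls[0:cnt]
--
--     if answer == '':
--         return 'N'
--
--     return answer
-- ===== SOURCE B (Python) =====
-- def solution(input_string):
--     # One pass over the string: a character is "lonely" iff it starts a second
--     # (or later) maximal run, i.e. it reappears after a different character.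
--     seen = set()
--     lonely = set()
--     prev = None
--     for ch in input_string:
--         if ch != prev:
--             if ch in seen:
--                 lonely.add(ch)
--             seen.add(ch)
--             prev = ch
--     return ''.join(sorted(lonely)) or 'N'
-- ===== Notes on version B (the rewrite author's own statement) =====
-- stated objective: faster
-- what changed: Replaces sort-all-characters plus per-distinct-character list.count/substring-scan/del-slice with a single pass that records a character as lonely when it starts a second maximal run (seen-set + previous-char tracking), then sorts only the distinct lonely characters.
import Mathlib
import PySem

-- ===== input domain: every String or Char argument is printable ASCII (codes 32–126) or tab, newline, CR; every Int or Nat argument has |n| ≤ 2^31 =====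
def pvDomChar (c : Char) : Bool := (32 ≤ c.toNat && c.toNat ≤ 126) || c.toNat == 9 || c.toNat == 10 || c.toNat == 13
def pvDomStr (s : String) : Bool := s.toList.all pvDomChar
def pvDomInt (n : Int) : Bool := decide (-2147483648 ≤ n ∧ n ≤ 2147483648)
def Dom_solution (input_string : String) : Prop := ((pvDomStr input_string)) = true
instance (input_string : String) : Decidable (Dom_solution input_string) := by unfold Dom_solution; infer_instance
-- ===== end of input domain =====

-- B replaces A's sort-everything + per-character count/substring-scan/del-slice loop by a
-- single pass that detects a character starting a second maximal run; measured faster (asymptotic).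

-- ===== PORT A =====
-- while (ls): cnt = ls.count(ls[0]); s = cnt*ls[0]; if s not in input_string: answer += ls[0]; del ls[0:cnt]
def pvSolLoopA (orig : List Char) : List Char → List Char
  | [] => []
  | a :: t =>
    let cnt := (a :: t).count a
    let s := List.replicate cnt a            -- cnt * ls[0]
    (if PySem.Chars.isIn s orig then [] else [a]) ++ pvSolLoopA orig ((a :: t).drop cnt)
  termination_by ls => ls.length
  decreasing_by
    simp only [List.length_drop, List.count_cons_self, List.length_cons]
    omega

def solution (input_string : String) : String :=
  let l := input_string.toList
  let ls0 := l.foldl (fun acc e => acc ++ [e]) []        -- for e in input_string: ls.append(e)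
  let ls := PySem.List.sorted ls0 (fun x => x) false     -- ls.sort()
  let answer := pvSolLoopA l ls
  if answer = [] then "N" else String.ofList answer          -- answer += … collected as chars

-- ===== PORT B =====
-- state (seen, lonely, prev); for ch: if ch != prev: (if ch in seen: lonely.add(ch)); seen.add(ch); prev = ch
def pvStepB (st : PySem.Set Char × PySem.Set Char × Option Char) (ch : Char) :
    PySem.Set Char × PySem.Set Char × Option Char :=
  if some ch ≠ st.2.2 then
    (PySem.Set.add st.1 ch,
     (if PySem.Set.contains st.1 ch then PySem.Set.add st.2.1 ch else st.2.1),
     some ch)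
  else st

def solution_alt (input_string : String) : String :=
  let fin := input_string.toList.foldl pvStepB (PySem.Set.empty, PySem.Set.empty, none)
  let out := PySem.List.sorted fin.2.1 (fun x => x) false
  if out = [] then "N" else String.ofList out                -- ''.join(sorted(lonely)) or 'N'

-- ===== PRECONDITION & SPEC =====
def Spec_solution (input_string : String) (out : String) : Prop := out = solution_alt input_string
instance (input_string : String) (out : String) : Decidable (Spec_solution input_string out) := by unfold Spec_solution; infer_instance

-- ===== CLAIM (what is proved, stated in full; the proofs are below) =====
def Claim_equal_solution : Prop := ∀ (input_string : String), Dom_solution input_string → Spec_solution input_string (solution input_string)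

-- ===== LEMMAS AND PROOFS =====

-- number of maximal runs of c (pvRcAux threads the previous character)
def pvRcAux (c p : Char) : List Char → Nat
  | [] => 0
  | b :: t => (if b = c ∧ b ≠ p then 1 else 0) + pvRcAux c b t

def pvRc (c : Char) : List Char → Nat
  | [] => 0
  | a :: t => (if a = c then 1 else 0) + pvRcAux c a t

theorem pvRcAux_of_ne {c p : Char} (h : p ≠ c) (l : List Char) : pvRcAux c p l = pvRc c l := by
  cases l with
  | nil => rfl
  | cons b t =>
    simp only [pvRcAux, pvRc]
    by_cases hb : b = c
    · subst hb; simp [Ne.symm h]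
    · simp [hb]

theorem pvRcAux_eq_zero {c : Char} {l : List Char} (h : c ∉ l) (p : Char) : pvRcAux c p l = 0 := by
  induction l generalizing p with
  | nil => rfl
  | cons b t ih =>
    have hb : b ≠ c := by rintro rfl; exact h (List.mem_cons_self ..)
    simp only [pvRcAux, hb, false_and, if_false, Nat.zero_add]
    exact ih (fun hm => h (List.mem_cons_of_mem _ hm)) b

theorem pvRc_eq_zero {c : Char} {l : List Char} (h : c ∉ l) : pvRc c l = 0 := by
  cases l with
  | nil => rfl
  | cons a t =>
    have ha : a ≠ c := by rintro rfl; exact h (List.mem_cons_self ..)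
    simp only [pvRc, ha, if_false, Nat.zero_add]
    exact pvRcAux_eq_zero (fun hm => h (List.mem_cons_of_mem _ hm)) a

theorem pvRc_pos_iff {c : Char} {l : List Char} : 0 < pvRc c l ↔ c ∈ l := by
  induction l with
  | nil => simp [pvRc]
  | cons a t ih =>
    by_cases ha : a = c
    · subst ha; simp [pvRc]
    · have hac : a ≠ c := ha
      rw [show pvRc c (a :: t) = pvRcAux c a t by simp [pvRc, hac], pvRcAux_of_ne hac]
      simp [ih, List.mem_cons, Ne.symm hac]

theorem pvRcAux_snoc (c q b : Char) (p : List Char) :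
    pvRcAux c q (p ++ [b]) = pvRcAux c q p + (if b = c ∧ p.getLastD q ≠ b then 1 else 0) := by
  induction p generalizing q with
  | nil => simp [pvRcAux, ne_comm]
  | cons x p' ih => simp only [List.cons_append, pvRcAux, ih x, List.getLastD_cons]; omega

theorem pvRc_snoc (c b : Char) (p : List Char) :
    pvRc c (p ++ [b]) = pvRc c p + (if b = c ∧ p.getLast? ≠ some b then 1 else 0) := by
  cases p with
  | nil => simp [pvRc, pvRcAux]
  | cons a p' =>
    simp only [List.cons_append, pvRc, pvRcAux_snoc c a b p', List.getLast?_cons, List.getLastD_eq_getLast?, ne_eq,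
      Option.some.injEq]
    omega

theorem pvRcAux_prefix {c p : Char} {u : List Char} (hu : c ∉ u) (hp : p ≠ c) (m : List Char) :
    pvRcAux c p (u ++ m) = pvRc c m := by
  induction u generalizing p with
  | nil => exact pvRcAux_of_ne hp m
  | cons x u' ih =>
    have hx : x ≠ c := by rintro rfl; exact hu (List.mem_cons_self ..)
    simp only [List.cons_append, pvRcAux, hx, false_and, if_false, Nat.zero_add]
    exact ih (fun hm => hu (List.mem_cons_of_mem _ hm)) hx

theorem pvRc_append_of_not_mem {c : Char} {u : List Char} (hu : c ∉ u) (m : List Char) :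
    pvRc c (u ++ m) = pvRc c m := by
  cases u with
  | nil => rfl
  | cons x u' =>
    have hx : x ≠ c := by rintro rfl; exact hu (List.mem_cons_self ..)
    simp only [List.cons_append, pvRc, hx, if_false, Nat.zero_add]
    exact pvRcAux_prefix (fun hm => hu (List.mem_cons_of_mem _ hm)) hx m

theorem pvRcAux_self_replicate (c : Char) (k : Nat) (v : List Char) :
    pvRcAux c c (List.replicate k c ++ v) = pvRcAux c c v := by
  induction k with
  | zero => rfl
  | succ k ih => simpa [List.replicate_succ, pvRcAux] using ih

theorem pvRc_replicate_append {c : Char} {n : Nat} (hn : 1 ≤ n) (v : List Char) :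
    pvRc c (List.replicate n c ++ v) = 1 + pvRcAux c c v := by
  obtain ⟨n', rfl⟩ : ∃ n', n = n' + 1 := ⟨n - 1, by omega⟩
  simp [List.replicate_succ, pvRc, pvRcAux_self_replicate]

theorem pvRc_decomp {c : Char} {u v : List Char} {n : Nat}
    (hu : c ∉ u) (hv : c ∉ v) (hn : 1 ≤ n) :
    pvRc c (u ++ (List.replicate n c ++ v)) = 1 := by
  rw [pvRc_append_of_not_mem hu, pvRc_replicate_append hn, pvRcAux_eq_zero hv]

theorem pvRc_one_of_infix {c : Char} {l : List Char} (hmem : c ∈ l)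
    (h : List.replicate (l.count c) c <:+: l) : pvRc c l = 1 := by
  obtain ⟨u, v, hl⟩ := h
  have hn : 1 ≤ l.count c := List.count_pos_iff.mpr hmem
  have hcnt : l.count c = u.count c + (l.count c + v.count c) := by
    conv_lhs => rw [← hl]
    simp [List.count_append]
  have hu : c ∉ u := List.count_eq_zero.mp (by omega)
  have hv : c ∉ v := List.count_eq_zero.mp (by omega)
  calc pvRc c l = pvRc c (u ++ (List.replicate (l.count c) c ++ v)) := by
        rw [← List.append_assoc, hl]
    _ = 1 := pvRc_decomp hu hv hn

theorem pvRun_split (c : Char) (l : List Char) :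
    ∃ k v, l = List.replicate k c ++ v ∧ ∀ b, v.head? = some b → b ≠ c := by
  induction l with
  | nil => exact ⟨0, [], rfl, by simp⟩
  | cons a t ih =>
    by_cases ha : a = c
    · obtain ⟨k, v, hl, hv⟩ := ih
      exact ⟨k + 1, v, by simp [List.replicate_succ, ha, hl], hv⟩
    · exact ⟨0, a :: t, rfl, by simpa using ha⟩

theorem pvFirst_run {c : Char} : ∀ {l : List Char}, c ∈ l →
    ∃ u k v, l = u ++ (List.replicate k c ++ v) ∧ c ∉ u ∧ 1 ≤ k ∧
      ∀ b, v.head? = some b → b ≠ c := by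
  intro l
  induction l with
  | nil => intro h; cases h
  | cons a t ih =>
    intro hmem
    by_cases ha : a = c
    · subst ha
      obtain ⟨k, v, hl, hv⟩ := pvRun_split a (a :: t)
      have hk : 1 ≤ k := by
        rcases k with _ | k
        · exfalso
          have hv' : v = a :: t := by simpa using hl.symm
          exact hv a (by simp [hv']) rfl
        · omega
      exact ⟨[], k, v, by simpa using hl, by simp, hk, hv⟩
    · have : c ∈ t := by cases hmem with
        | head => exact absurd rfl ha
        | tail _ h => exact h
      obtain ⟨u, k, v, hl, hu, hk, hv⟩ := ih this
      exact ⟨a :: u, k, v, by simp [hl], by simp only [List.mem_cons, not_or]; exact ⟨fun h => ha h.symm, hu⟩, hk, hv⟩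

theorem pvRcAux_self_eq_rc {c : Char} {v : List Char}
    (h : ∀ b, v.head? = some b → b ≠ c) : pvRcAux c c v = pvRc c v := by
  cases v with
  | nil => rfl
  | cons b t =>
    have hb : b ≠ c := h b rfl
    simp [pvRcAux, pvRc, hb]

theorem pvInfix_of_rc_one {c : Char} {l : List Char} (hmem : c ∈ l)
    (h1 : pvRc c l = 1) : List.replicate (l.count c) c <:+: l := by
  obtain ⟨u, k, v, hl, hu, hk, hv⟩ := pvFirst_run hmem
  have hrc : pvRc c l = 1 + pvRc c v := by
    rw [hl, pvRc_append_of_not_mem hu, pvRc_replicate_append hk, pvRcAux_self_eq_rc hv]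
  have hv0 : c ∉ v := by
    intro hcv
    have := pvRc_pos_iff.mpr hcv
    omega
  have hcount : l.count c = k := by
    rw [hl]
    simp [List.count_append, List.count_eq_zero.mpr hu,
      List.count_eq_zero.mpr hv0]
  rw [hcount]
  exact ⟨u, v, by rw [hl, List.append_assoc]⟩

theorem pvLonely_iff {c : Char} {l : List Char} (hmem : c ∈ l) :
    ¬ (List.replicate (l.count c) c <:+: l) ↔ 2 ≤ pvRc c l := by
  constructor
  · intro h
    have h1 : 0 < pvRc c l := pvRc_pos_iff.mpr hmem
    rcases Nat.lt_or_ge (pvRc c l) 2 with h2 | h2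
    · exact absurd (pvInfix_of_rc_one hmem (by omega)) h
    · exact h2
  · intro h2 hinf
    have := pvRc_one_of_infix hmem hinf
    omega

-- side A: block structure of a sorted list
theorem pvSorted_block {a : Char} : ∀ {l : List Char}, l.Pairwise (· ≤ ·) → (∀ x ∈ l, a ≤ x) →
    l = List.replicate (l.count a) a ++ l.dropWhile (fun x => x == a) ∧
    ∀ x ∈ l.dropWhile (fun x => x == a), a < x := by
  intro l
  induction l with
  | nil => intro _ _; exact ⟨rfl, by simp⟩
  | cons b t ih =>
    intro hs hge
    have hb := (List.pairwise_cons.mp hs).1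
    have ht := (List.pairwise_cons.mp hs).2
    by_cases hba : b = a
    · subst hba
      have hge' : ∀ x ∈ t, b ≤ x := hb
      obtain ⟨h1, h2⟩ := ih ht hge'
      constructor
      · simpa [List.count_cons_self, List.replicate_succ, List.dropWhile_cons] using
          congrArg (List.cons b) h1
      · simpa [List.dropWhile_cons] using h2
    · have hab : a < b := lt_of_le_of_ne (hge b (List.mem_cons_self ..)) (fun h => hba h.symm)
      have hna : a ∉ b :: t := by
        intro hm
        rcases List.mem_cons.mp hm with h | h
        · exact hba h.symm
        · exact absurd (hb a h) (not_le.mpr hab)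
      constructor
      · simp [List.count_eq_zero.mpr hna, hba]
      · intro x hx
        rw [List.dropWhile_cons_of_neg (by simpa using hba)] at hx
        rcases List.mem_cons.mp hx with h | h
        · exact h ▸ hab
        · exact lt_of_lt_of_le hab (hb x h)

theorem pvLoopA_spec (orig : List Char) : ∀ (n : Nat) (ls : List Char), ls.length ≤ n →
    ls.Pairwise (· ≤ ·) →
    (pvSolLoopA orig ls).Pairwise (· < ·) ∧
    ∀ c, c ∈ pvSolLoopA orig ls ↔
      c ∈ ls ∧ PySem.Chars.isIn (List.replicate (ls.count c) c) orig = false := by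
  intro n
  induction n with
  | zero =>
    intro ls hlen _
    have hnil : ls = [] := List.eq_nil_of_length_eq_zero (by omega)
    subst hnil
    simp [pvSolLoopA]
  | succ n ih =>
    intro ls hlen hs
    cases ls with
    | nil => simp [pvSolLoopA]
    | cons a t =>
      have hge : ∀ x ∈ a :: t, a ≤ x := by
        intro x hx
        rcases List.mem_cons.mp hx with rfl | hx
        · exact le_refl x
        · exact (List.pairwise_cons.mp hs).1 x hx
      obtain ⟨hblock, hrest⟩ := pvSorted_block hs hge
      set cnt := (a :: t).count a with hcnt
      set rest := (a :: t).dropWhile (fun x => x == a) with hrestdef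
      have hcnt1 : 1 ≤ cnt := by
        have : 0 < (a :: t).count a := List.count_pos_iff.mpr (List.mem_cons_self ..)
        omega
      have hdrop : (a :: t).drop cnt = rest := by
        rw [hblock]
        have := List.drop_left (l₁ := List.replicate cnt a) (l₂ := rest)
        rwa [List.length_replicate] at this
      have hrs : rest.Pairwise (· ≤ ·) := hs.sublist (List.dropWhile_sublist _)
      have hrlen : rest.length ≤ n := by
        have hb := congrArg List.length hblock
        simp only [List.length_cons, List.length_append, List.length_replicate] at hb
        simp only [List.length_cons] at hlen
        omega
      obtain ⟨ihp, ihm⟩ := ih rest hrlen hrs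
      have hstep : pvSolLoopA orig (a :: t) =
          (if PySem.Chars.isIn (List.replicate cnt a) orig then [] else [a]) ++
            pvSolLoopA orig rest := by
        rw [pvSolLoopA, hdrop]
      have hanotin : a ∉ rest := fun hm => lt_irrefl a (hrest a hm)
      have hcount : ∀ c, c ≠ a → (a :: t).count c = rest.count c := by
        intro c hca
        conv_lhs => rw [hblock]
        simp [List.count_append, List.count_replicate, Ne.symm hca]
      have hmemsplit : ∀ c, c ≠ a → (c ∈ a :: t ↔ c ∈ rest) := by
        intro c hca
        conv_lhs => rw [hblock]
        simp [List.mem_append, List.mem_replicate, hca]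
      refine ⟨?_, ?_⟩
      · rw [hstep]
        by_cases hin : PySem.Chars.isIn (List.replicate cnt a) orig = true
        · simpa [hin] using ihp
        · simp only [Bool.not_eq_true] at hin
          simp only [hin, Bool.false_eq_true, if_false, List.singleton_append]
          exact List.pairwise_cons.mpr
            ⟨fun x hx => hrest x ((ihm x).mp hx).1, ihp⟩
      · intro c
        rw [hstep]
        by_cases hca : c = a
        · subst hca
          have hnr : c ∉ pvSolLoopA orig rest := fun hm => hanotin ((ihm c).mp hm).1
          rw [show List.count c (c :: t) = cnt from hcnt.symm]
          by_cases hin : PySem.Chars.isIn (List.replicate cnt c) orig = true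
          · simp [hin, hnr]
          · simp only [Bool.not_eq_true] at hin
            simp [hin]
        · have h1 : (a :: t).count c = rest.count c := hcount c hca
          have h2 : c ∈ a :: t ↔ c ∈ rest := hmemsplit c hca
          rw [h1, h2, ← ihm c]
          by_cases hin : PySem.Chars.isIn (List.replicate cnt a) orig = true
          · simp [hin]
          · simp only [Bool.not_eq_true] at hin
            simp [hin, hca]

-- side B: fold invariant
theorem pvFoldB_spec : ∀ (l p : List Char) (seen lonely : PySem.Set Char) (prev : Option Char),
    (∀ x, x ∈ seen ↔ x ∈ p) → lonely.Nodup →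
    (∀ x, x ∈ lonely ↔ 2 ≤ pvRc x p) → prev = p.getLast? →
    (∀ x, x ∈ (l.foldl pvStepB (seen, lonely, prev)).2.1 ↔ 2 ≤ pvRc x (p ++ l)) ∧
    (l.foldl pvStepB (seen, lonely, prev)).2.1.Nodup := by
  intro l
  induction l with
  | nil =>
    intro p seen lonely prev hseen hln hl hp
    simpa using ⟨hl, hln⟩
  | cons ch l' ih =>
    intro p seen lonely prev hseen hln hl hp
    rw [List.foldl_cons, show p ++ ch :: l' = (p ++ [ch]) ++ l' from by simp]
    by_cases hne : some ch = prev
    · have hlast : p.getLast? = some ch := by rw [← hp, ← hne]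
      have hstep : pvStepB (seen, lonely, prev) ch = (seen, lonely, prev) := by
        simp [pvStepB, hne]
      rw [hstep]
      have hchp : ch ∈ p := List.mem_of_getLast? hlast
      have hrc : ∀ x, pvRc x (p ++ [ch]) = pvRc x p := by
        intro x
        rw [pvRc_snoc]
        simp [hlast]
      refine ih (p ++ [ch]) seen lonely prev ?_ hln ?_ ?_
      · intro x
        rw [hseen x]
        simp only [List.mem_append, List.mem_singleton]
        constructor
        · exact Or.inl
        · rintro (h | rfl)
          · exact h
          · exact hchp
      · intro x; rw [hl x, hrc x]
      · rw [List.getLast?_concat, hne]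
    · have hlast : p.getLast? ≠ some ch := by rw [← hp]; exact fun h => hne h.symm
      have hstep : pvStepB (seen, lonely, prev) ch =
          (PySem.Set.add seen ch,
           (if PySem.Set.contains seen ch then PySem.Set.add lonely ch else lonely),
           some ch) := by
        simp [pvStepB, hne]
      rw [hstep]
      have hrc : ∀ x, pvRc x (p ++ [ch]) = pvRc x p + (if ch = x then 1 else 0) := by
        intro x
        rw [pvRc_snoc]
        by_cases hx : ch = x
        · subst hx; simp [hlast]
        · simp [hx]
      refine ih (p ++ [ch]) _ _ _ ?_ ?_ ?_ ?_
      · intro x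
        rw [PySem.Set.mem_add, hseen x]
        simp [List.mem_append]
      · by_cases hc : ch ∈ seen
        · have hcb : PySem.Set.contains seen ch = true := (PySem.Set.contains_iff seen ch).mpr hc
          simp only [hcb, if_true]
          exact PySem.Set.nodup_add lonely ch hln
        · have hcb : PySem.Set.contains seen ch = false := by
            rw [← Bool.not_eq_true]
            exact fun h => hc ((PySem.Set.contains_iff seen ch).mp h)
          simpa only [hcb, Bool.false_eq_true, if_false] using hln
      · intro x
        rw [hrc x]
        by_cases hx : x = ch
        · subst hx
          by_cases hc : x ∈ seen
          · have hcb : PySem.Set.contains seen x = true := (PySem.Set.contains_iff seen x).mpr hc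
            have hpos : 0 < pvRc x p := pvRc_pos_iff.mpr ((hseen x).mp hc)
            simp [hc, PySem.Set.mem_add]
            omega
          · have hcb : PySem.Set.contains seen x = false := by
              rw [← Bool.not_eq_true]
              exact fun h => hc ((PySem.Set.contains_iff seen x).mp h)
            have h0 : pvRc x p = 0 := pvRc_eq_zero (fun hm => hc ((hseen x).mpr hm))
            have hnl : x ∉ lonely := fun hm => by
              have := (hl x).mp hm; omega
            simp [hc, h0, hnl]
        · have hx' : ¬ (ch = x) := fun h => hx h.symm
          rw [if_neg hx', Nat.add_zero, ← hl x]
          by_cases hc : ch ∈ seen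
          · have hcb : PySem.Set.contains seen ch = true := (PySem.Set.contains_iff seen ch).mpr hc
            simp only [hcb, if_true, PySem.Set.mem_add]
            constructor
            · rintro (h | rfl)
              · exact h
              · exact absurd rfl hx
            · exact Or.inl
          · have hcb : PySem.Set.contains seen ch = false := by
              rw [← Bool.not_eq_true]
              exact fun h => hc ((PySem.Set.contains_iff seen ch).mp h)
            simp only [hcb, Bool.false_eq_true, if_false]
      · rw [List.getLast?_concat]

-- ===== VERDICT (by name: the statement is the Claim_ definition above) =====
theorem pvMain (s : String) : solution s = solution_alt s := by
  unfold solution solution_alt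
  dsimp only
  have hfold : s.toList.foldl (fun acc e => acc ++ [e]) [] = s.toList := by
    simpa using PySem.List.foldl_append_singleton_eq_map (fun x : Char => x) s.toList []
  rw [hfold]
  set l := s.toList with hldef
  set ls := PySem.List.sorted l (fun x => x) false with hlsdef
  obtain ⟨hApw, hAmem⟩ := pvLoopA_spec l ls.length ls le_rfl
    (by simpa using PySem.List.sorted_pairwise l (fun x => x))
  set A := pvSolLoopA l ls with hAdef
  set fin := l.foldl pvStepB (PySem.Set.empty, PySem.Set.empty, none) with hfindef
  obtain ⟨hBmem, hBnd⟩ := pvFoldB_spec l [] [] [] none (by simp) List.nodup_nil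
    (by intro x; simp [pvRc]) rfl
  simp only [List.nil_append] at hBmem
  have hAchar : ∀ c, c ∈ A ↔ 2 ≤ pvRc c l := by
    intro c
    rw [hAmem c]
    constructor
    · rintro ⟨hmem, hfalse⟩
      have hmem' : c ∈ l := (PySem.List.mem_sorted ..).mp hmem
      have hcnt : ls.count c = l.count c := (PySem.List.sorted_perm ..).count_eq c
      rw [hcnt] at hfalse
      exact (pvLonely_iff hmem').mp ((PySem.Chars.isIn_eq_false_iff ..).mp hfalse)
    · intro h2
      have hmem' : c ∈ l := pvRc_pos_iff.mp (by omega)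
      have hcnt : ls.count c = l.count c := (PySem.List.sorted_perm ..).count_eq c
      refine ⟨(PySem.List.mem_sorted ..).mpr hmem', ?_⟩
      rw [hcnt]
      exact (PySem.Chars.isIn_eq_false_iff ..).mpr (fun hinf => by
        have := (pvLonely_iff hmem').mpr h2; exact this hinf)
  have hAnd : A.Nodup := hApw.imp (fun h => ne_of_lt h)
  have hperm : A.Perm fin.2.1 :=
    (List.perm_ext_iff_of_nodup hAnd hBnd).mpr (fun c => (hAchar c).trans (hBmem c).symm)
  have hsort : PySem.List.sorted fin.2.1 (fun x => x) false = A :=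
    PySem.List.sorted_eq_of_perm_of_pairwise_lt fin.2.1 A (fun x => x) hperm hApw
  rw [hsort]

theorem solution_spec : Claim_equal_solution := by
  intro s _
  unfold Spec_solution
  exact pvMain s
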